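/- GENERATED by farm/mkstatement.py from design/units.tsv (unit `heap_alloc`) and the Specs of ProgX/Base/Spec/*.lean — do not edit.
   THE STATEMENT of the proof unit `heap_alloc`: the function `heap_alloc` (21 instructions) satisfies its contract,
   given the contracts of its callees. What the names mean: ProgX/Base/Spec/Basic.lean. The theorem to prove:
   `theorem heap_alloc_ok : ProgX.Base.Spec.heap_alloc.Statement`. -/
import ProgX.Base.Spec.Heap
import ProgX.Base.Spec.Runtime
namespace ProgX.Base.Spec.heap_alloc
open X86 X86.User Asan

/-- The statement of unit `heap_alloc`. -/
def Statement : Prop :=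
  ∀ (Lay : Layout) (_hLay : Lay.hi = 0x1000000) (μ : Microarch) (_hμ : UserX.MicroOK μ) (u₀ : State)
    (_hcode : HasCodeNat Lay u₀ ProgX.Base.L.heap_alloc.entry ProgX.Base.Code.code_heap_alloc.nat ProgX.Base.L.heap_alloc.size)
    (_h_arena_unpoison : Calls Lay μ ProgX.Base.WayInv (ProgX.Base.conv u₀) ProgX.Base.L.arena_unpoison.entry Asan.arenaUnpoisonSpec),
    ∀ (H : Heap) (rest : List Obj) (frames : List (Nat × FrameLayout)), Calls Lay μ ProgX.Base.WayInv (ProgX.Base.conv u₀) ProgX.Base.L.heap_alloc.entry (ProgX.Base.Spec.heap_alloc.spec H rest frames)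

end ProgX.Base.Spec.heap_alloc
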